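-- pv_equiv track=rewrite | github.com/makaires77/ppgcs | source/domain/research_process_automation.py | _identify_key_elements
-- ===== SOURCE A (Python) =====
-- def _identify_key_elements(concepts):
--     """
--     Identificar elementos-chave como sujeito, objeto e ação nos conceitos.
--     Retorna um dicionário com estes elementos.
--     """
--     elements = {'subject': None, 'action': None, 'object': None}
--     for i, word in enumerate(concepts):
--         if word in ['effect', 'impact', 'role', 'influence']:
--             elements['action'] = word
--             if i > 0:
--                 elements['subject'] = concepts[i - 1]
--             if i + 1 < len(concepts):
--                 elements['object'] = concepts[i + 1]
--     return elements
-- ===== SOURCE B (Python) =====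
-- def _identify_key_elements(concepts):
--     """Locate the last keyword occurrence, then build all three fields from it."""
--     keywords = {'effect', 'impact', 'role', 'influence'}
--     idx = next((i for i in range(len(concepts) - 1, -1, -1) if concepts[i] in keywords), None)
--     elements = {'subject': None, 'action': None, 'object': None}
--     if idx is not None:
--         elements['action'] = concepts[idx]
--         if idx > 0:
--             elements['subject'] = concepts[idx - 1]
--         if idx + 1 < len(concepts):
--             elements['object'] = concepts[idx + 1]
--     return elements
-- ===== Notes on version B (the rewrite author's own statement) =====
-- stated objective: alternative
-- what changed: Replaces A's scan-and-overwrite loop over a mutable dict with a locate-then-build decomposition: find the index of the last keyword occurrence once, then derive subject/action/object from that single index.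
-- intended difference: On lists whose last element is a keyword and that contain another keyword earlier, A returns an 'object' left over from the earlier keyword match (a stale value from a different occurrence than its 'action'), while B returns object=None, deriving all fields consistently from the last occurrence, which is the intended reading. — e.g. on _identify_key_elements(["impact", "a", "effect"]): A returns [("subject", some "a"), ("action", some "effect"), ("object", some "a")], B returns [("subject", some "a"), ("action", some "effect"), ("object", none)]
import Mathlib
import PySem

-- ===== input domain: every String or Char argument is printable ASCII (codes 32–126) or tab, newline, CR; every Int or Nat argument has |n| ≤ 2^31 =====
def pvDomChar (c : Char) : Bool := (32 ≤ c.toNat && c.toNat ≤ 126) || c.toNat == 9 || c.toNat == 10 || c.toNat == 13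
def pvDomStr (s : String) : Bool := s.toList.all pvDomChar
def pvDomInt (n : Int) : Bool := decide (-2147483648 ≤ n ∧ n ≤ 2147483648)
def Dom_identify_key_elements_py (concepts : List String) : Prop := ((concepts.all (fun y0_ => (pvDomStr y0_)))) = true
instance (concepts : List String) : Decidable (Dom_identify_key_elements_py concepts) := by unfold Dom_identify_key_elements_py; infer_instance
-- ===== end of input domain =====

-- B locates the last keyword occurrence once and builds all fields from that single index (alternative decomposition, same cost); on lists ending in a keyword that also contain an earlier keyword, A's 'object' is a stale leftover from the earlier match and B intentionally returns None there (see D_).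


-- ===== PORT A =====
-- scan-and-overwrite loop: subject/object are overwritten only under the i>0 / i+1<len guards
def identify_key_elements_py (concepts : List String) : List (String × Option String) :=
  let e := (PySem.List.enumerate concepts 0).foldl
    (fun (e : Option String × Option String × Option String) (p : Int × String) =>
      if p.2 = "effect" ∨ p.2 = "impact" ∨ p.2 = "role" ∨ p.2 = "influence" then
        let a : Option String := some p.2
        let s : Option String :=
          if 0 < p.1 then some (PySem.List.pyGetD concepts (p.1 - 1) "") else e.1
        let o : Option String :=
          if p.1 + 1 < (concepts.length : Int) then some (PySem.List.pyGetD concepts (p.1 + 1) "") else e.2.2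
        (s, a, o)
      else e)
    (none, none, none)
  [("subject", e.1), ("action", e.2.1), ("object", e.2.2)]

-- ===== PORT B =====
-- locate-then-build: the last keyword occurrence (next over range(len-1,-1,-1)) determines all three fields
def identify_key_elements_py_alt (concepts : List String) : List (String × Option String) :=
  let keywords : List String := ["effect", "impact", "role", "influence"]
  let idx? := (PySem.List.pyRange ((concepts.length : Int) - 1) (-1) (-1)).find?
      (fun i => keywords.contains (PySem.List.pyGetD concepts i ""))
  match idx? with
  | none => [("subject", none), ("action", none), ("object", none)]
  | some i =>
    [("subject", if 0 < i then some (PySem.List.pyGetD concepts (i - 1) "") else none),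
     ("action", some (PySem.List.pyGetD concepts i "")),
     ("object", if i + 1 < (concepts.length : Int) then some (PySem.List.pyGetD concepts (i + 1) "") else none)]

-- ===== PRECONDITION & SPEC =====
-- On lists whose last element is a keyword and that contain another keyword earlier, A returns an
-- 'object' left over from the earlier keyword match (a stale value from a different occurrence than
-- its 'action'), while B returns object=None, deriving all fields consistently from the last
-- occurrence, which is the intended reading.
def D_identify_key_elements_py (concepts : List String) : Prop :=
  (concepts.getLast?.any (fun w => w == "effect" || w == "impact" || w == "role" || w == "influence")) = true ∧
  (concepts.dropLast.any (fun w => w == "effect" || w == "impact" || w == "role" || w == "influence")) = true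
instance (concepts : List String) : Decidable (D_identify_key_elements_py concepts) := by
  unfold D_identify_key_elements_py; infer_instance

def Spec_identify_key_elements_py (concepts : List String) (out : List (String × Option String)) : Prop :=
  ¬ D_identify_key_elements_py concepts → out = identify_key_elements_py_alt concepts
instance (concepts : List String) (out : List (String × Option String)) : Decidable (Spec_identify_key_elements_py concepts out) := by unfold Spec_identify_key_elements_py; infer_instance

def pvDiffWitness_identify_key_elements_py : List String := ["impact", "a", "effect"]
def pvDiffWitnessOut_identify_key_elements_py : (List (String × Option String)) × (List (String × Option String)) :=
  ([("subject", some "a"), ("action", some "effect"), ("object", some "a")],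
   [("subject", some "a"), ("action", some "effect"), ("object", none)])

-- ===== CLAIM (what is proved, stated in full; the proofs are below) =====
def Claim_unchanged_identify_key_elements_py : Prop := ∀ (concepts : List String), Dom_identify_key_elements_py concepts → Spec_identify_key_elements_py concepts (identify_key_elements_py concepts)
def Claim_changed_identify_key_elements_py : Prop := Dom_identify_key_elements_py (pvDiffWitness_identify_key_elements_py) ∧ D_identify_key_elements_py (pvDiffWitness_identify_key_elements_py) ∧ identify_key_elements_py (pvDiffWitness_identify_key_elements_py) = pvDiffWitnessOut_identify_key_elements_py.1 ∧ identify_key_elements_py_alt (pvDiffWitness_identify_key_elements_py) = pvDiffWitnessOut_identify_key_elements_py.2 ∧ pvDiffWitnessOut_identify_key_elements_py.1 ≠ pvDiffWitnessOut_identify_key_elements_py.2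
def Claim_exact_identify_key_elements_py : Prop := ∀ (concepts : List String), Dom_identify_key_elements_py concepts → D_identify_key_elements_py concepts → identify_key_elements_py concepts ≠ identify_key_elements_py_alt concepts

-- ===== LEMMAS AND PROOFS =====

-- A's loop body, named so the fold can be reasoned about
def pvStep (concepts : List String) (e : Option String × Option String × Option String)
    (p : Int × String) : Option String × Option String × Option String :=
  if p.2 = "effect" ∨ p.2 = "impact" ∨ p.2 = "role" ∨ p.2 = "influence" then
    let a : Option String := some p.2
    let s : Option String :=
      if 0 < p.1 then some (PySem.List.pyGetD concepts (p.1 - 1) "") else e.1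
    let o : Option String :=
      if p.1 + 1 < (concepts.length : Int) then some (PySem.List.pyGetD concepts (p.1 + 1) "") else e.2.2
    (s, a, o)
  else e

def pvKw (w : String) : Bool :=
  decide (w = "effect" ∨ w = "impact" ∨ w = "role" ∨ w = "influence")

-- "last update wins": value of one field after the loop = f at the last element passing q, else the init
def pvPick {α β : Type} (l : List α) (q : α → Bool) (f : α → β) (x0 : β) : β :=
  match l.reverse.find? q with
  | some p => f p
  | none => x0

theorem pvPick_nil {α β : Type} (q : α → Bool) (f : α → β) (x0 : β) :
    pvPick [] q f x0 = x0 := rfl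

theorem pvPick_cons {α β : Type} (p : α) (l : List α) (q : α → Bool) (f : α → β) (x0 : β) :
    pvPick (p :: l) q f x0 = pvPick l q f (if q p then f p else x0) := by
  unfold pvPick
  rw [List.reverse_cons, List.find?_append]
  cases h : l.reverse.find? q with
  | some r => simp
  | none => cases hq : q p <;> simp [hq, List.find?]

theorem pvLoop_char (c : List String) (l : List (Int × String)) :
    ∀ s a o : Option String,
      l.foldl (pvStep c) (s, a, o) =
        (pvPick l (fun p => pvKw p.2 && decide (0 < p.1))
            (fun p => some (PySem.List.pyGetD c (p.1 - 1) "")) s,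
         pvPick l (fun p => pvKw p.2) (fun p => some p.2) a,
         pvPick l (fun p => pvKw p.2 && decide (p.1 + 1 < (c.length : Int)))
            (fun p => some (PySem.List.pyGetD c (p.1 + 1) "")) o) := by
  induction l with
  | nil => intro s a o; simp [pvPick_nil]
  | cons p l ih =>
    intro s a o
    rw [List.foldl_cons, pvPick_cons, pvPick_cons, pvPick_cons]
    by_cases hk : p.2 = "effect" ∨ p.2 = "impact" ∨ p.2 = "role" ∨ p.2 = "influence"
    · have hkb : pvKw p.2 = true := by simp [pvKw, hk]
      simp only [pvStep, hk, if_true]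
      by_cases h1 : 0 < p.1 <;> by_cases h2 : p.1 + 1 < (c.length : Int) <;>
        simp [hkb, h1, h2, ih]
    · have hkb : pvKw p.2 = false := by simp [pvKw, hk]
      simp only [pvStep, hk, if_false]
      simp [hkb, ih]

theorem pvPortA_char (c : List String) :
    identify_key_elements_py c =
      [("subject", pvPick (PySem.List.enumerate c 0) (fun p => pvKw p.2 && decide (0 < p.1))
          (fun p => some (PySem.List.pyGetD c (p.1 - 1) "")) none),
       ("action", pvPick (PySem.List.enumerate c 0) (fun p => pvKw p.2) (fun p => some p.2) none),
       ("object", pvPick (PySem.List.enumerate c 0) (fun p => pvKw p.2 && decide (p.1 + 1 < (c.length : Int)))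
          (fun p => some (PySem.List.pyGetD c (p.1 + 1) "")) none)] := by
  show (let e := (PySem.List.enumerate c 0).foldl (pvStep c) (none, none, none)
        [("subject", e.1), ("action", e.2.1), ("object", e.2.2)]) = _
  rw [pvLoop_char c (PySem.List.enumerate c 0) none none none]

theorem pvFind?_ext {α : Type} (l : List α) (p q : α → Bool) (h : ∀ x, p x = q x) :
    l.find? p = l.find? q := by
  have : p = q := funext h
  rw [this]

-- the keyword test as one Bool-valued predicate
def pvKwB (w : String) : Bool := w == "effect" || w == "impact" || w == "role" || w == "influence"

theorem pvKw_contains (w : String) : pvKw w = pvKwB w := by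
  simp [pvKw, pvKwB, beq_eq_decide, Bool.or_assoc]

theorem pvContains_eq (w : String) :
    (["effect", "impact", "role", "influence"] : List String).contains w = pvKwB w := by
  simp [pvKwB, beq_eq_decide, Bool.or_assoc]

theorem pvFind?_and_none {α : Type} (l : List α) (q r : α → Bool) (h : l.find? q = none) :
    l.find? (fun x => q x && r x) = none := by
  rw [List.find?_eq_none] at h ⊢
  intro x hx
  simp [h x hx]

theorem pvPick_map {α β γ : Type} (l : List α) (g : α → β) (q : β → Bool) (f : β → γ) (x0 : γ) :
    pvPick (l.map g) q f x0 = pvPick l (fun i => q (g i)) (fun i => f (g i)) x0 := by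
  unfold pvPick
  rw [show (l.map g).reverse = l.reverse.map g by simp [List.map_reverse], List.find?_map]
  have h' : l.reverse.find? (fun i => q (g i)) = l.reverse.find? (q ∘ g) := rfl
  rw [h']
  cases h : l.reverse.find? (q ∘ g) <;> simp

-- the index-level predicate both characterizations share
def pvQ (c : List String) (i : Int) : Bool :=
  pvKwB (PySem.List.pyGetD c i "")

-- the descending index list both sides effectively scan
def pvL (c : List String) : List Int :=
  (PySem.List.pyRange 0 (c.length : Int) 1).reverse

theorem pvPortA_char' (c : List String) :
    identify_key_elements_py c =
      [("subject", ((pvL c).find? (fun i => pvQ c i && decide (0 < i))).map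
          (fun i => PySem.List.pyGetD c (i - 1) "")),
       ("action", ((pvL c).find? (pvQ c)).map (fun i => PySem.List.pyGetD c i "")),
       ("object", ((pvL c).find? (fun i => pvQ c i && decide (i + 1 < (c.length : Int)))).map
          (fun i => PySem.List.pyGetD c (i + 1) ""))] := by
  rw [pvPortA_char]
  have henum : PySem.List.enumerate c 0 =
      (PySem.List.pyRange 0 (c.length : Int) 1).map (fun j => (j, PySem.List.pyGetD c j "")) :=
    PySem.List.enumerate_eq_map_pyRange (xs := c) ""
  rw [henum, pvPick_map, pvPick_map, pvPick_map]
  have hq : ∀ i : Int, pvKw (PySem.List.pyGetD c i "") = pvQ c i := fun i => pvKw_contains _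
  unfold pvPick pvL
  simp only [hq]
  cases h1 : (PySem.List.pyRange 0 (c.length : Int) 1).reverse.find? (fun i => pvQ c i && decide (0 < i)) <;>
  cases h2 : (PySem.List.pyRange 0 (c.length : Int) 1).reverse.find? (pvQ c) <;>
  cases h3 : (PySem.List.pyRange 0 (c.length : Int) 1).reverse.find?
      (fun i => pvQ c i && decide (i + 1 < (c.length : Int))) <;>
  simp

theorem pvPortB_char (c : List String) :
    identify_key_elements_py_alt c =
      match (pvL c).find? (pvQ c) with
      | none => [("subject", none), ("action", none), ("object", none)]
      | some i =>
        [("subject", if 0 < i then some (PySem.List.pyGetD c (i - 1) "") else none),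
         ("action", some (PySem.List.pyGetD c i "")),
         ("object", if i + 1 < (c.length : Int) then some (PySem.List.pyGetD c (i + 1) "") else none)] := by
  unfold identify_key_elements_py_alt pvL
  dsimp only
  rw [show PySem.List.pyRange ((c.length : Int) - 1) (-1) (-1)
        = (PySem.List.pyRange 0 (c.length : Int) 1).reverse by
      rw [PySem.List.pyRange_neg_one_eq_reverse]; norm_num]
  rw [pvFind?_ext _ _ (pvQ c) (fun i => pvContains_eq _)]

-- find? of a conjunction when the first match of q also passes r
theorem pvFind?_and_of_pass {α : Type} (l : List α) (q r : α → Bool) (j : α)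
    (h : l.find? q = some j) (hr : r j = true) :
    l.find? (fun x => q x && r x) = some j := by
  induction l with
  | nil => simp at h
  | cons a t ih =>
    by_cases ha : q a = true
    · rw [List.find?_cons_of_pos ha] at h
      cases h
      rw [List.find?_cons_of_pos (by simp [ha, hr])]
    · rw [List.find?_cons_of_neg (by simp [ha])] at h
      rw [List.find?_cons_of_neg (by simp [ha])]
      exact ih h

-- find? of a conjunction is none when the unique match of q is the LAST element and fails r
theorem pvFind?_and_of_last {α : Type} (l : List α) (q r : α → Bool) (j : α)
    (h : l.find? q = some j) (hlast : l.getLast? = some j) (hnd : l.Nodup) (hr : r j = false) :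
    l.find? (fun x => q x && r x) = none := by
  induction l with
  | nil => simp at h
  | cons a t ih =>
    by_cases ha : q a = true
    · rw [List.find?_cons_of_pos ha] at h
      have hja : j = a := (Option.some.inj h).symm
      subst hja
      -- j is the first match and also the last element: t must be empty (nodup)
      cases t with
      | nil => simp [ha, hr]
      | cons b t' =>
        exfalso
        rw [List.getLast?_cons_cons] at hlast
        exact (List.nodup_cons.mp hnd).1 (List.mem_of_getLast? hlast)
    · rw [List.find?_cons_of_neg (by simp [ha])] at h
      rw [List.find?_cons_of_neg (by simp [ha])]
      have hlast' : t.getLast? = some j := by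
        cases t with
        | nil => simp at h
        | cons b t' => rw [List.getLast?_cons_cons] at hlast; exact hlast
      exact ih h hlast' (List.nodup_cons.mp hnd).2

theorem pvFind?_congr {α : Type} (l : List α) (p q : α → Bool)
    (h : ∀ x ∈ l, p x = q x) : l.find? p = l.find? q := by
  induction l with
  | nil => rfl
  | cons a t ih =>
    have ha := h a (by simp)
    by_cases hp : p a = true
    · rw [List.find?_cons_of_pos hp, List.find?_cons_of_pos (ha ▸ hp)]
    · rw [List.find?_cons_of_neg (by simpa using hp),
          List.find?_cons_of_neg (by rw [← ha]; simpa using hp)]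
      exact ih (fun x hx => h x (by simp [hx]))

theorem pvL_nodup (c : List String) : (pvL c).Nodup := by
  unfold pvL
  exact List.nodup_reverse.mpr (PySem.List.nodup_pyRange_one 0 (c.length : Int))

theorem pvMem_pvL (c : List String) (i : Int) : i ∈ pvL c ↔ 0 ≤ i ∧ i < (c.length : Int) := by
  unfold pvL
  rw [List.mem_reverse, PySem.List.mem_pyRange_one]

theorem pvL_getLast? (c : List String) (h : c ≠ []) : (pvL c).getLast? = some 0 := by
  unfold pvL
  rw [List.getLast?_reverse, PySem.List.pyRange_one_cons (by
    have : 0 < c.length := List.length_pos_iff.mpr h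
    exact_mod_cast this)]
  rfl

theorem pvL_cons (c : List String) (h : c ≠ []) :
    pvL c = ((c.length : Int) - 1) :: (PySem.List.pyRange 0 ((c.length : Int) - 1) 1).reverse := by
  unfold pvL
  have h0 : (0 : Int) ≤ (c.length : Int) - 1 := by
    have : 0 < c.length := List.length_pos_iff.mpr h
    omega
  rw [show (c.length : Int) = ((c.length : Int) - 1) + 1 by ring,
      PySem.List.pyRange_one_succ_right h0, List.reverse_append]
  simp

-- last element of c is a keyword ↔ pvQ at index len-1 (c nonempty)
theorem pvQ_last (c : List String) (h : c ≠ []) :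
    (c.getLast?.any (fun w => w == "effect" || w == "impact" || w == "role" || w == "influence")) = pvQ c ((c.length : Int) - 1) := by
  have hlen : 0 < c.length := List.length_pos_iff.mpr h
  rw [pvQ, PySem.List.pyGetD_eq_getElem c "" (by omega) (by omega)]
  have ht : ((c.length : Int) - 1).toNat = c.length - 1 := by omega
  rw [List.getLast?_eq_getElem?, List.getElem?_eq_getElem (by omega)]
  simp [ht, pvKwB]

-- some earlier element of c is a keyword ↔ the tail of the descending scan finds one
theorem pvQ_dropLast (c : List String) :
    (c.dropLast.any (fun w => w == "effect" || w == "impact" || w == "role" || w == "influence")) = true ↔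
      ((PySem.List.pyRange 0 ((c.length : Int) - 1) 1).reverse.find? (pvQ c)).isSome := by
  rw [List.any_eq_true, List.find?_isSome]
  constructor
  · rintro ⟨x, hx, hkw⟩
    obtain ⟨k, hk, hget⟩ := List.mem_iff_getElem.mp hx
    rw [List.length_dropLast] at hk
    refine ⟨(k : Int), ?_, ?_⟩
    · rw [List.mem_reverse, PySem.List.mem_pyRange_one]
      exact ⟨Int.natCast_nonneg k, by omega⟩
    · rw [pvQ, PySem.List.pyGetD_eq_getElem c "" (by omega) (by omega)]
      rw [List.getElem_dropLast] at hget
      have ht : ((k : Int)).toNat = k := by omega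
      simp only [ht]
      rw [hget]
      exact hkw
  · rintro ⟨i, hi, hq⟩
    rw [List.mem_reverse, PySem.List.mem_pyRange_one] at hi
    have hk : i.toNat < c.dropLast.length := by rw [List.length_dropLast]; omega
    refine ⟨c.dropLast[i.toNat], List.getElem_mem _, ?_⟩
    rw [List.getElem_dropLast]
    rw [pvQ, PySem.List.pyGetD_eq_getElem c "" (by omega) (by omega)] at hq
    exact hq

-- core agreement outside D_
theorem pvPorts_agree (c : List String) (hnd : ¬ D_identify_key_elements_py c) :
    identify_key_elements_py c = identify_key_elements_py_alt c := by
  rw [pvPortA_char', pvPortB_char]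
  cases hfind : (pvL c).find? (pvQ c) with
  | none =>
    rw [pvFind?_and_none _ _ _ hfind, pvFind?_and_none _ _ _ hfind]
    simp
  | some j =>
    have hQj : pvQ c j = true := List.find?_some hfind
    have hjmem : j ∈ pvL c := List.mem_of_find?_eq_some hfind
    have hj := (pvMem_pvL c j).mp hjmem
    have hc : c ≠ [] := by
      intro h; subst h; simp at hj; omega
    -- subject
    have hsub : ((pvL c).find? (fun i => pvQ c i && decide (0 < i))).map
        (fun i => PySem.List.pyGetD c (i - 1) "")
        = (if 0 < j then some (PySem.List.pyGetD c (j - 1) "") else none) := by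
      by_cases h0 : 0 < j
      · rw [pvFind?_and_of_pass _ _ _ j hfind (by simp [h0]), if_pos h0]
        rfl
      · have hj0 : j = 0 := by omega
        subst hj0
        rw [pvFind?_and_of_last _ _ _ 0 hfind (pvL_getLast? c hc) (pvL_nodup c) (by simp)]
        simp
    -- object
    have hobj : ((pvL c).find? (fun i => pvQ c i && decide (i + 1 < (c.length : Int)))).map
        (fun i => PySem.List.pyGetD c (i + 1) "")
        = (if j + 1 < (c.length : Int) then some (PySem.List.pyGetD c (j + 1) "") else none) := by
      by_cases h1 : j + 1 < (c.length : Int)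
      · rw [pvFind?_and_of_pass _ _ _ j hfind (by simp [h1]), if_pos h1]
        rfl
      · have hjn : j = (c.length : Int) - 1 := by omega
        subst hjn
        rw [if_neg h1]
        -- A's find? skips the head (guard false) and must find nothing in the tail, else D_ holds
        rw [pvL_cons c hc, List.find?_cons_of_neg (by simp)]
        cases hrest : (PySem.List.pyRange 0 ((c.length : Int) - 1) 1).reverse.find?
            (fun i => pvQ c i && decide (i + 1 < (c.length : Int))) with
        | none => rfl
        | some j' =>
          exfalso
          apply hnd
          have hrest' : ((PySem.List.pyRange 0 ((c.length : Int) - 1) 1).reverse.find? (pvQ c)).isSome := by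
            rw [pvFind?_congr _ (pvQ c) (fun i => pvQ c i && decide (i + 1 < (c.length : Int)))
              (by
                intro x hx
                rw [List.mem_reverse, PySem.List.mem_pyRange_one] at hx
                simp [show x + 1 < (c.length : Int) by omega])]
            rw [hrest]
            rfl
          constructor
          · rw [pvQ_last c hc]; exact hQj
          · exact (pvQ_dropLast c).mpr hrest'
    rw [hsub, hobj]
    simp

-- inside D_ the ports always differ (object: some vs none)
theorem pvPorts_differ (c : List String) (hd : D_identify_key_elements_py c) :
    identify_key_elements_py c ≠ identify_key_elements_py_alt c := by
  obtain ⟨hlast, hdrop⟩ := hd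
  have hc : c ≠ [] := by
    intro h; subst h; simp at hlast
  have hQlast : pvQ c ((c.length : Int) - 1) = true := by
    rw [← pvQ_last c hc]; exact hlast
  have hfind : (pvL c).find? (pvQ c) = some ((c.length : Int) - 1) := by
    rw [pvL_cons c hc, List.find?_cons_of_pos hQlast]
  have hrest := (pvQ_dropLast c).mp hdrop
  obtain ⟨j', hj'⟩ := Option.isSome_iff_exists.mp hrest
  rw [pvPortA_char', pvPortB_char, hfind]
  have hobjA : ((pvL c).find? (fun i => pvQ c i && decide (i + 1 < (c.length : Int)))).map
      (fun i => PySem.List.pyGetD c (i + 1) "")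
      = some (PySem.List.pyGetD c (j' + 1) "") := by
    rw [pvL_cons c hc, List.find?_cons_of_neg (by simp)]
    rw [pvFind?_congr _ (fun i => pvQ c i && decide (i + 1 < (c.length : Int))) (pvQ c)
      (by
        intro x hx
        rw [List.mem_reverse, PySem.List.mem_pyRange_one] at hx
        simp [show x + 1 < (c.length : Int) by omega])]
    rw [hj']
    rfl
  rw [hobjA]
  intro h
  simp at h

-- ===== VERDICT (by name: the statements are the Claim_ definitions above) =====
theorem identify_key_elements_py_spec : Claim_unchanged_identify_key_elements_py := by
  intro c _ hnd
  exact pvPorts_agree c hnd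

theorem identify_key_elements_py_changed : Claim_changed_identify_key_elements_py := by
  unfold Claim_changed_identify_key_elements_py; decide

theorem identify_key_elements_py_tight : Claim_exact_identify_key_elements_py := by
  intro c _ hd
  exact pvPorts_differ c hd
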